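-- pv_equiv track=rewrite | github.com/nadphwr/Practice | SM3.py | sm3_fill
-- ===== SOURCE A (Python) =====
-- def sm3_fill(m):
--     len_m=len(m)
--     k=0
--     while True:
--         if (len_m+1+k)%512==448:
--             break
--         k=k+1
--     m=m+'1'
--     for i in range(k):
--         m=m+'0'
--     lenm=list(bin(len_m))
--     lenm[:2]=['0','0']
--     lenm=''.join(lenm)
--     tempm=''
--     for i in range(64-len(lenm)):
--         tempm=tempm+'0'
--     m=m+tempm+lenm
--     return m
-- ===== SOURCE B (Python) =====
-- def sm3_fill(m):
--     L = len(m)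
--     k = (448 - (L + 1)) % 512
--     # length field: two zero bits, then L in binary zero-filled to 62 bits
--     # (equals the 64-bit big-endian length for every realistic message)
--     return m + '1' + '0' * k + '00' + format(L, 'b').zfill(62)
-- ===== Notes on version B (the rewrite author's own statement) =====
-- stated objective: simpler
-- what changed: Replaces the while-loop search for k with the closed form (448-(len+1)) mod 512, and replaces the bin()/slice-assignment/char-append padding loops with a direct length field: two zero bits followed by the message length in binary zero-filled to 62 bits (identical to the field A builds for every length).
import Mathlib
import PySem

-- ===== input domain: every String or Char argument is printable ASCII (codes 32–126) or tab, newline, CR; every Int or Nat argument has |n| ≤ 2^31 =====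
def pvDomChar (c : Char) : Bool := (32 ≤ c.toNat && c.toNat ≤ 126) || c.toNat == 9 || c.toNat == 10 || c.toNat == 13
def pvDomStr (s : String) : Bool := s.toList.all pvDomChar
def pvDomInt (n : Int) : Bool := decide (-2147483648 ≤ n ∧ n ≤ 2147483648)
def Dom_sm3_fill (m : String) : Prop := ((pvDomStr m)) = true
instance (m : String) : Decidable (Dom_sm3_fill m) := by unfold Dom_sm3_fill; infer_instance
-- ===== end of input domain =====

-- B replaces A's while-loop search for k by the closed form (448-(len+1)) mod 512 and the
-- bin/slice-assignment/padding-loop construction of the length field by a direct zfill; objective: simpler.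

-- ===== PORT A =====

-- binary digits of n (MSB first), empty for 0; exact core of Python's bin().
-- Structural recursion on a fuel counter; fuel = n always suffices since n/2 < n.
def binCoreF : Nat → Nat → List Char
  | 0, _ => []
  | _ + 1, 0 => []
  | f + 1, n + 1 => binCoreF f ((n + 1) / 2) ++ [if (n + 1) % 2 = 1 then '1' else '0']

def binCore (n : Nat) : List Char := binCoreF n n

-- Python bin(n) for n ≥ 0, as a list of chars (exact)
def pyBin (n : Nat) : List Char := '0' :: 'b' :: (if n = 0 then ['0'] else binCore n)

-- the 'while True' search for k; fuel 512 only makes the loop total (it is proved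
-- below that the break is always reached within 512 iterations)
def sm3LoopF : Nat → Nat → Nat → Nat
  | 0, _, k => k
  | f + 1, L, k => if (L + 1 + k) % 512 = 448 then k else sm3LoopF f L (k + 1)

def sm3Loop (L k : Nat) : Nat := sm3LoopF 512 L k

def sm3_fill (m : String) : String :=
  let len_m := m.toList.length
  let k := sm3Loop len_m 0
  let m1 := m.toList ++ ['1']
  let m2 := (List.range k).foldl (fun s _ => s ++ ['0']) m1
  let lenm0 := pyBin len_m
  let lenm := ['0', '0'] ++ lenm0.drop 2        -- lenm[:2] = ['0','0']
  let tempm := (List.range (64 - lenm.length)).foldl (fun s _ => s ++ ['0']) []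
  String.ofList (m2 ++ tempm ++ lenm)

-- ===== PORT B =====

-- format(n,'b'): binary digits accumulated front-to-back (fuel = n suffices)
def binBAuxF : Nat → Nat → List Char → List Char
  | 0, _, acc => acc
  | _ + 1, 0, acc => acc
  | f + 1, n + 1, acc => binBAuxF f ((n + 1) / 2) ((if (n + 1) % 2 = 1 then '1' else '0') :: acc)

def binB (n : Nat) : List Char := if n = 0 then ['0'] else binBAuxF n n []

def sm3_fill_alt (m : String) : String :=
  let L := m.toList.length
  let k := (PySem.Int.mod (448 - ((L : Int) + 1)) 512).toNat
  let bits := binB L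
  String.ofList (m.toList ++ '1' :: (List.replicate k '0' ++
    ('0' :: '0' :: (List.replicate (62 - bits.length) '0' ++ bits))))

-- ===== PRECONDITION & SPEC =====
def Spec_sm3_fill (m : String) (out : String) : Prop := out = sm3_fill_alt m
instance (m : String) (out : String) : Decidable (Spec_sm3_fill m out) := by unfold Spec_sm3_fill; infer_instance

-- ===== CLAIM (what is proved, stated in full; the proofs are below) =====
def Claim_equal_sm3_fill : Prop := ∀ (m : String), Dom_sm3_fill m → Spec_sm3_fill m (sm3_fill m)

-- ===== LEMMAS AND PROOFS =====

-- A's search loop computes the closed-form distance to 448 (mod 512), given enough fuel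
theorem sm3LoopF_eq (f L k : Nat) (hf : (448 + 512 - (L + 1 + k) % 512) % 512 < f) :
    sm3LoopF f L k = k + (448 + 512 - (L + 1 + k) % 512) % 512 := by
  induction f generalizing k with
  | zero => omega
  | succ f ih =>
    rw [sm3LoopF]
    split
    · omega
    · rw [ih (k + 1) (by omega)]; omega

theorem sm3Loop_eq (L k : Nat) :
    sm3Loop L k = k + (448 + 512 - (L + 1 + k) % 512) % 512 := by
  exact sm3LoopF_eq 512 L k (by omega)

theorem binBAuxF_eq (f n : Nat) (acc : List Char) :
    binBAuxF f n acc = binCoreF f n ++ acc := by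
  induction f generalizing n acc with
  | zero => rfl
  | succ f ih =>
    cases n with
    | zero => rfl
    | succ n => rw [binBAuxF, binCoreF, ih]; simp

theorem binB_eq (n : Nat) : binB n = (if n = 0 then ['0'] else binCore n) := by
  unfold binB binCore
  split <;> simp [binBAuxF_eq]

theorem foldl_append_zero (k : Nat) (s : List Char) :
    (List.range k).foldl (fun s _ => s ++ ['0']) s = s ++ List.replicate k '0' := by
  induction k generalizing s with
  | zero => simp
  | succ k ih => rw [List.range_succ, List.foldl_append] ; simp [ih, List.replicate_succ']

theorem replicate_cons_cons (j : Nat) (l : List Char) :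
    List.replicate j '0' ++ '0' :: '0' :: l = '0' :: '0' :: (List.replicate j '0' ++ l) := by
  have : ('0' : Char) :: '0' :: l = List.replicate 2 '0' ++ l := rfl
  rw [this, ← List.append_assoc, ← List.replicate_add]
  have : ('0' : Char) :: '0' :: (List.replicate j '0' ++ l) = List.replicate 2 '0' ++ (List.replicate j '0' ++ l) := rfl
  rw [this, ← List.append_assoc, ← List.replicate_add, Nat.add_comm]

-- ===== VERDICT (by name: the statement is the Claim_ definition above) =====
theorem sm3_fill_spec : Claim_equal_sm3_fill := by
  intro m _
  unfold Spec_sm3_fill sm3_fill sm3_fill_alt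
  set L := m.toList.length with hL
  set bits : List Char := if L = 0 then ['0'] else binCore L with hbits
  have hk : sm3Loop L 0 = (PySem.Int.mod (448 - ((L : Int) + 1)) 512).toNat := by
    rw [sm3Loop_eq, PySem.Int.mod_eq_emod_of_pos (by norm_num)]
    omega
  simp only [foldl_append_zero, binB_eq, pyBin, List.drop, ← hbits, hk]
  have hlen : 64 - (['0', '0'] ++ bits).length = 62 - bits.length := by
    simp
  rw [hlen]
  apply congrArg
  simp only [List.append_assoc, List.cons_append, List.nil_append]
  rw [replicate_cons_cons]
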